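-- pv_equiv track=rewrite | github.com/abhishekprakash256/python-playground | dsa-python/Sliding_window/maxium_in_sliding.py | decrease_queue
-- ===== SOURCE A (Python) =====
-- def decrease_queue(lst):
-- 	"""
-- 	The function to make the decreasing queue
--
-- 	"""
-- 	lst_queue = []
--
-- 	#start the comparision and popping
--
-- 	for i in lst:
--
-- 		#monotonic decreasing
-- 		while True:
--
-- 			if len(lst_queue) == 0:
--
-- 				lst_queue.append(i)
-- 				break
--
-- 			elif lst_queue[len(lst_queue) - 1]  >= i:
--
-- 				lst_queue.append(i)
--
-- 				break
--
-- 			else: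
--
-- 				lst_queue.pop(0)
--
-- 	return lst_queue
-- ===== SOURCE B (Python) =====
-- def decrease_queue(lst):
--     """
--     The function to make the decreasing queue
--
--     """
--     result = []
--     for i in lst:
--         if result and not (result[-1] >= i):
--             # the original's inner loop pops the FRONT until empty here,
--             # which never changes the tail: net effect is a bulk clear
--             result = [i]
--         else:
--             result.append(i)
--     return result
-- ===== Notes on version B (the rewrite author's own statement) =====
-- stated objective: simpler
-- what changed: Replaces the inner while-loop that pops the queue's front one element at a time (which never changes the tail, so it always empties the whole queue) with a single-pass bulk reset: if the tail is smaller than the element, start a fresh [i], else append.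
import Mathlib
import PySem

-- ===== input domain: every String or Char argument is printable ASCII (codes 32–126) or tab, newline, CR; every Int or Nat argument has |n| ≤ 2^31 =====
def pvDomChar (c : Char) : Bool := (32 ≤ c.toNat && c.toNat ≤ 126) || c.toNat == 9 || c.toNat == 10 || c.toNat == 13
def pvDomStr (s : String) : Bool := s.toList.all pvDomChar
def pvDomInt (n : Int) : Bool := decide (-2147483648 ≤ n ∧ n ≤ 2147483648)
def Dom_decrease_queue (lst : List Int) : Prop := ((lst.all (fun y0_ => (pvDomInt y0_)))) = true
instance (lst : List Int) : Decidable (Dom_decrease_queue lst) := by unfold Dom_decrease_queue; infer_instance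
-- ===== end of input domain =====

-- B replaces A's front-popping inner while-loop (which always empties the whole
-- queue, since popping the front never changes the tail) by a single-pass bulk
-- reset; objective: simpler.


-- ===== PORT A =====
-- A's inner `while True`: if the queue is empty, append i and stop; elif the
-- last element ≥ i, append i and stop; else pop the FRONT and loop.
-- Structural recursion on the queue mirrors the pop(0).
def decreaseInner (q : List Int) (i : Int) : List Int :=
  match q with
  | [] => [i]
  | x :: xs =>
    if (x :: xs).getLast (by simp) ≥ i then (x :: xs) ++ [i]
    else decreaseInner xs i

def decrease_queue (lst : List Int) : List Int :=
  lst.foldl (fun lst_queue i => decreaseInner lst_queue i) []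

-- ===== PORT B =====
def decrease_queue_alt (lst : List Int) : List Int :=
  lst.foldl
    (fun result i =>
      match result with
      | [] => result ++ [i]
      | x :: xs =>
        if ¬ ((x :: xs).getLast (by simp) ≥ i) then [i]
        else result ++ [i])
    []

-- ===== PRECONDITION & SPEC =====
def Spec_decrease_queue (lst : List Int) (out : List Int) : Prop := out = decrease_queue_alt lst
instance (lst : List Int) (out : List Int) : Decidable (Spec_decrease_queue lst out) := by unfold Spec_decrease_queue; infer_instance

-- ===== CLAIM (what is proved, stated in full; the proofs are below) =====
def Claim_equal_decrease_queue : Prop := ∀ (lst : List Int), Dom_decrease_queue lst → Spec_decrease_queue lst (decrease_queue lst)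

-- ===== LEMMAS AND PROOFS =====

-- A's inner loop equals B's one step: popping the front never changes the tail,
-- so a tail < i empties the queue entirely.
theorem decreaseInner_eq_step (q : List Int) (i : Int) :
    decreaseInner q i =
      (match q with
       | [] => q ++ [i]
       | x :: xs =>
         if ¬ ((x :: xs).getLast (by simp) ≥ i) then [i]
         else q ++ [i]) := by
  induction q with
  | nil => simp [decreaseInner]
  | cons x xs ih =>
    cases xs with
    | nil =>
      simp only [decreaseInner]
      split_ifs <;> simp_all [decreaseInner]
    | cons y ys =>
      simp only [decreaseInner] at *
      have hlast : (x :: y :: ys).getLast (by simp) = (y :: ys).getLast (by simp) := by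
        simp [List.getLast]
      rw [hlast]
      split_ifs <;> simp_all

theorem foldl_eq (lst : List Int) (acc : List Int) :
    lst.foldl (fun q i => decreaseInner q i) acc =
    lst.foldl
      (fun result i =>
        match result with
        | [] => result ++ [i]
        | x :: xs =>
          if ¬ ((x :: xs).getLast (by simp) ≥ i) then [i]
          else result ++ [i])
      acc := by
  induction lst generalizing acc with
  | nil => rfl
  | cons a l ih =>
    rw [List.foldl_cons, List.foldl_cons, decreaseInner_eq_step]
    exact ih _

-- ===== VERDICT (by name: the statement is the Claim_ definition above) =====
theorem decrease_queue_spec : Claim_equal_decrease_queue := by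
  intro lst _
  unfold Spec_decrease_queue decrease_queue decrease_queue_alt
  exact foldl_eq lst []
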